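-- pv_equiv track=rewrite | github.com/tompickup23/burnleycouncil | burnley-council/scripts/elections_etl.py | match_ward_name
-- ===== SOURCE A (Python) =====
-- def normalise_ward_name(name):
--     """Normalise ward name for matching (case-insensitive, space-normalised, strip 'Ward' suffix)."""
--     n = ' '.join(name.lower().split())
--     # Strip trailing ' ward' suffix (Lancaster uses 'Bare Ward', 'Bulk Ward' etc.)
--     if n.endswith(' ward'):
--         n = n[:-5].strip()
--     return n
--
-- def match_ward_name(dcleapil_ward, known_wards):
--     """Match a DCLEAPIL ward name to our wards.json names.
--     Returns the matched name or None."""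
--     norm = normalise_ward_name(dcleapil_ward)
--     for kw in known_wards:
--         if normalise_ward_name(kw) == norm:
--             return kw
--     # Try without 'with' spacing: 'Coal Clough With' -> 'Coalclough with'
--     norm_nospace = norm.replace(' with ', 'with').replace('coal clough', 'coalclough')
--     for kw in known_wards:
--         kw_norm = normalise_ward_name(kw).replace(' with ', 'with').replace('coal clough', 'coalclough')
--         if kw_norm == norm_nospace:
--             return kw
--     # Try 'and' vs '&' and hyphen variations
--     norm_and = norm.replace(' and ', '-').replace('-with-', ' with ')
--     for kw in known_wards:
--         kw_norm = normalise_ward_name(kw).replace(' and ', '-').replace('-with-', ' with ')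
--         if kw_norm == norm_and:
--             return kw
--     # Try substring matching — only if name is 5+ chars to avoid false matches
--     # e.g. DCLEAPIL 'Carnforth' matches 'Carnforth and Millhead Ward'
--     if len(norm) >= 5:
--         for kw in known_wards:
--             kw_norm = normalise_ward_name(kw)
--             if norm in kw_norm or kw_norm in norm:
--                 return kw
--     return None
-- ===== SOURCE B (Python) =====
-- def normalise_ward_name(name):
--     """Normalise ward name for matching (case-insensitive, space-normalised, strip 'Ward' suffix)."""
--     n = ' '.join(name.lower().split())
--     if n.endswith(' ward'):
--         n = n[:-5].strip()
--     return n
--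
--
-- def _nospace(s):
--     return s.replace(' with ', 'with').replace('coal clough', 'coalclough')
--
--
-- def _andhyph(s):
--     return s.replace(' and ', '-').replace('-with-', ' with ')
--
--
-- def _match_level(norm, norm_nospace, norm_and, sub_ok, kw, cap):
--     """Lowest pass (0-3) at which kw matches norm, if below cap; else cap."""
--     if cap <= 0:
--         return cap
--     kw_norm = normalise_ward_name(kw)
--     if kw_norm == norm:
--         return 0
--     if cap <= 1:
--         return cap
--     if _nospace(kw_norm) == norm_nospace:
--         return 1
--     if cap <= 2:
--         return cap
--     if _andhyph(kw_norm) == norm_and: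
--         return 2
--     if cap <= 3:
--         return cap
--     if sub_ok and (norm in kw_norm or kw_norm in norm):
--         return 3
--     return cap
--
--
-- def match_ward_name(dcleapil_ward, known_wards):
--     """Match a DCLEAPIL ward name to our wards.json names (single pass, best level wins)."""
--     norm = normalise_ward_name(dcleapil_ward)
--     norm_nospace = _nospace(norm)
--     norm_and = _andhyph(norm)
--     sub_ok = len(norm) >= 5
--     best_level, best = 4, None
--     for kw in known_wards:
--         level = _match_level(norm, norm_nospace, norm_and, sub_ok, kw, best_level)
--         if level < best_level:
--             best_level, best = level, kw
--     return best
-- ===== Notes on version B (the rewrite author's own statement) =====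
-- stated objective: alternative
-- what changed: Replaced A's four sequential scans over known_wards (one per matching pass) by a single pass that computes each candidate's lowest matching pass level (pruned by the best level so far, with the query's transformed forms precomputed once) and keeps the first candidate with the strictly smallest level.
import Mathlib
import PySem

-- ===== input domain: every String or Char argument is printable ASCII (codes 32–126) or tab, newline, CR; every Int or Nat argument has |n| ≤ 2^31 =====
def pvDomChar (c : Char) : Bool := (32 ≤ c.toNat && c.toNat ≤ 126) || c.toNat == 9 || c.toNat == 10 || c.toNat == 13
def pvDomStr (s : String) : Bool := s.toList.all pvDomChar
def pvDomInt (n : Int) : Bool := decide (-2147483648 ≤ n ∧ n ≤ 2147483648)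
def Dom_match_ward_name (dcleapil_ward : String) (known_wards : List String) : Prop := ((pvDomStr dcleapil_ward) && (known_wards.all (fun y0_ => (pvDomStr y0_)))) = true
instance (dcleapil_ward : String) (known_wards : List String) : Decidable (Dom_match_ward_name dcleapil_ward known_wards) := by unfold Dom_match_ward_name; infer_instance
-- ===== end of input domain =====

-- B replaces A's four sequential scans over known_wards by a single pass that tracks the
-- best (lowest) matching pass level seen so far; objective: simpler (same exact result).

-- ===== PORT A =====
-- helper normalise_ward_name (shared by both Pythons, identical code)
def normWard (name : String) : String :=
  let n := PySem.Str.join " " (PySem.Str.split₀ (PySem.Str.lower name))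
  if PySem.Str.endswith n " ward" then PySem.Str.strip (PySem.Str.slice n none (some (-5))) else n

def match_ward_name (dcleapil_ward : String) (known_wards : List String) : Option String :=
  let norm := normWard dcleapil_ward
  match known_wards.find? (fun kw => normWard kw == norm) with
  | some kw => some kw
  | none =>
    let normNospace := PySem.Str.replace (PySem.Str.replace norm " with " "with") "coal clough" "coalclough"
    match known_wards.find? (fun kw =>
        PySem.Str.replace (PySem.Str.replace (normWard kw) " with " "with") "coal clough" "coalclough" == normNospace) with
    | some kw => some kw
    | none =>
      let normAnd := PySem.Str.replace (PySem.Str.replace norm " and " "-") "-with-" " with "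
      match known_wards.find? (fun kw =>
          PySem.Str.replace (PySem.Str.replace (normWard kw) " and " "-") "-with-" " with " == normAnd) with
      | some kw => some kw
      | none =>
        if 5 ≤ PySem.Str.len norm then
          known_wards.find? (fun kw => PySem.Str.isIn norm (normWard kw) || PySem.Str.isIn (normWard kw) norm)
        else none

-- ===== PORT B =====
def nospaceT (s : String) : String :=
  PySem.Str.replace (PySem.Str.replace s " with " "with") "coal clough" "coalclough"

def andhyphT (s : String) : String :=
  PySem.Str.replace (PySem.Str.replace s " and " "-") "-with-" " with "

def matchLevelCapped (norm normNospace normAnd : String) (subOk : Bool) (kw : String) (cap : Nat) : Nat :=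
  if cap ≤ 0 then cap
  else
    let kwNorm := normWard kw
    if kwNorm == norm then 0
    else if cap ≤ 1 then cap
    else if nospaceT kwNorm == normNospace then 1
    else if cap ≤ 2 then cap
    else if andhyphT kwNorm == normAnd then 2
    else if cap ≤ 3 then cap
    else if subOk = true ∧ (PySem.Str.isIn norm kwNorm || PySem.Str.isIn kwNorm norm) = true then 3
    else cap

def match_ward_name_alt (dcleapil_ward : String) (known_wards : List String) : Option String :=
  let norm := normWard dcleapil_ward
  let normNospace := nospaceT norm
  let normAnd := andhyphT norm
  let subOk := decide (5 ≤ PySem.Str.len norm)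
  (known_wards.foldl (fun (acc : Nat × Option String) kw =>
      let level := matchLevelCapped norm normNospace normAnd subOk kw acc.1
      if level < acc.1 then (level, some kw) else acc) (4, none)).2

-- ===== PRECONDITION & SPEC =====
def Spec_match_ward_name (dcleapil_ward : String) (known_wards : List String) (out : Option String) : Prop := out = match_ward_name_alt dcleapil_ward known_wards
instance (dcleapil_ward : String) (known_wards : List String) (out : Option String) : Decidable (Spec_match_ward_name dcleapil_ward known_wards out) := by unfold Spec_match_ward_name; infer_instance

-- ===== CLAIM (what is proved, stated in full; the proofs are below) =====
def Claim_equal_match_ward_name : Prop := ∀ (dcleapil_ward : String) (known_wards : List String), Dom_match_ward_name dcleapil_ward known_wards → Spec_match_ward_name dcleapil_ward known_wards (match_ward_name dcleapil_ward known_wards)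

-- ===== LEMMAS AND PROOFS =====

lemma foldr_min_base (xs : List Nat) (a b : Nat) (h : a ≤ b) :
    xs.foldr min a = min a (xs.foldr min b) := by
  induction xs with
  | nil => simp only [List.foldr_nil]; omega
  | cons x xs ih => rw [List.foldr_cons, List.foldr_cons, ih]; omega

lemma foldr_min_le_base (xs : List Nat) (b : Nat) : xs.foldr min b ≤ b := by
  induction xs with
  | nil => simp
  | cons x xs ih => rw [List.foldr_cons]; omega

lemma foldr_min_le_mem (xs : List Nat) (b : Nat) {x : Nat} (hx : x ∈ xs) :
    xs.foldr min b ≤ x := by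
  induction xs with
  | nil => cases hx
  | cons y ys ih =>
    rw [List.foldr_cons]
    rcases List.mem_cons.mp hx with h | h
    · omega
    · have := ih h; omega

lemma foldr_min_mem (xs : List Nat) (b : Nat) (h : xs.foldr min b < b) :
    xs.foldr min b ∈ xs := by
  induction xs with
  | nil => simp at h
  | cons x ys ih =>
    rw [List.foldr_cons] at h ⊢
    by_cases hle : x ≤ ys.foldr min b
    · have : min x (ys.foldr min b) = x := by omega
      rw [this]; exact List.mem_cons_self
    · have : min x (ys.foldr min b) = ys.foldr min b := by omega
      rw [this]
      exact List.mem_cons_of_mem _ (ih (by omega))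

lemma find?_congr_mem {α : Type} {p q : α → Bool} :
    ∀ xs : List α, (∀ x ∈ xs, p x = q x) → xs.find? p = xs.find? q := by
  intro xs h
  induction xs with
  | nil => rfl
  | cons x ys ih =>
    rw [List.find?_cons, List.find?_cons, h x List.mem_cons_self,
        ih (fun y hy => h y (List.mem_cons_of_mem _ hy))]

-- the uncapped level of B's pruned _match_level: lowest pass (0-3) at which kw matches, else 4
def matchLevel (norm kw : String) : Nat :=
  let kwNorm := normWard kw
  if kwNorm == norm then 0
  else if nospaceT kwNorm == nospaceT norm then 1
  else if andhyphT kwNorm == andhyphT norm then 2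
  else if 5 ≤ PySem.Str.len norm ∧ (PySem.Str.isIn norm kwNorm || PySem.Str.isIn kwNorm norm) = true then 3
  else 4

set_option maxHeartbeats 1000000 in
lemma matchLevelCapped_eq (n kw : String) (cap : Nat) (hcap : cap ≤ 4) :
    matchLevelCapped n (nospaceT n) (andhyphT n) (decide (5 ≤ PySem.Str.len n)) kw cap
      = min (matchLevel n kw) cap := by
  simp only [matchLevelCapped, matchLevel, decide_eq_true_eq]
  split_ifs <;> omega

lemma matchLevel_le (n kw : String) : matchLevel n kw ≤ 4 := by
  simp only [matchLevel]; split_ifs <;> omega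

lemma fold_capped_gen (L : String → Nat) (C : String → Nat → Nat)
    (hC : ∀ kw cap, cap ≤ 4 → C kw cap = min (L kw) cap) (hL : ∀ kw, L kw ≤ 4) :
    ∀ (ks : List String) (l : Nat) (b : Option String), l ≤ 4 →
    ks.foldl (fun (acc : Nat × Option String) kw =>
        let level := C kw acc.1
        if level < acc.1 then (level, some kw) else acc) (l, b)
    = ks.foldl (fun (acc : Nat × Option String) kw =>
        let level := L kw
        if level < acc.1 then (level, some kw) else acc) (l, b) := by
  intro ks
  induction ks with
  | nil => intro l b _; rfl
  | cons kw rest ih =>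
    intro l b hl
    rw [List.foldl_cons, List.foldl_cons]
    dsimp only
    rw [hC kw l hl]
    by_cases h : L kw < l
    · rw [if_pos (show min (L kw) l < l by omega), if_pos h,
          show min (L kw) l = L kw from by omega]
      exact ih (L kw) (some kw) (hL kw)
    · rw [if_neg (show ¬ min (L kw) l < l by omega), if_neg h]
      exact ih l b hl

lemma fold_best_spec {α : Type} (f : α → Nat) (ks : List α) (l : Nat) (b : Option α) :
    ks.foldl (fun (acc : Nat × Option α) kw =>
        let level := f kw
        if level < acc.1 then (level, some kw) else acc) (l, b)
    = ((ks.map f).foldr min l,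
       if (ks.map f).foldr min l < l then ks.find? (fun kw => f kw == (ks.map f).foldr min l) else b) := by
  induction ks generalizing l b with
  | nil => simp
  | cons kw rest ih =>
    simp only [List.foldl_cons, List.map_cons, List.foldr_cons, List.find?_cons]
    by_cases h : f kw < l
    · rw [if_pos h, ih (f kw) (some kw)]
      have hb : (rest.map f).foldr min (f kw) = min (f kw) ((rest.map f).foldr min l) :=
        foldr_min_base _ _ _ h.le
      rw [hb]
      have hmin : min (f kw) ((rest.map f).foldr min l) < l := by omega
      rw [if_pos hmin]
      by_cases h2 : (rest.map f).foldr min l < f kw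
      · have hne : (f kw == min (f kw) ((rest.map f).foldr min l)) = false := by
          simp; omega
        rw [if_pos (by omega : min (f kw) ((rest.map f).foldr min l) < f kw), hne]
      · have heq : min (f kw) ((rest.map f).foldr min l) = f kw := by omega
        rw [if_neg (by omega : ¬ min (f kw) ((rest.map f).foldr min l) < f kw), heq]
        simp
    · rw [if_neg h, ih l b]
      have hle : (rest.map f).foldr min l ≤ l := foldr_min_le_base _ _
      have heq : min (f kw) ((rest.map f).foldr min l) = (rest.map f).foldr min l := by omega
      rw [heq]
      by_cases h2 : (rest.map f).foldr min l < l
      · have hne : (f kw == (rest.map f).foldr min l) = false := by simp; omega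
        rw [if_pos h2, if_pos h2, hne]
      · rw [if_neg h2, if_neg h2]

-- pointwise relations between A's pass conditions and B's matchLevel
lemma level_c0 {n kw : String} (h : (normWard kw == n) = true) : matchLevel n kw = 0 := by
  simp only [matchLevel]; rw [if_pos h]

lemma level_c1 {n kw : String} (h : (nospaceT (normWard kw) == nospaceT n) = true) :
    matchLevel n kw ≤ 1 := by
  simp only [matchLevel]; split_ifs <;> omega

lemma level_c2 {n kw : String} (h : (andhyphT (normWard kw) == andhyphT n) = true) :
    matchLevel n kw ≤ 2 := by
  simp only [matchLevel]; split_ifs <;> omega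

lemma level_c3 {n kw : String} (hlen : 5 ≤ PySem.Str.len n)
    (h : (PySem.Str.isIn n (normWard kw) || PySem.Str.isIn (normWard kw) n) = true) :
    matchLevel n kw ≤ 3 := by
  simp only [matchLevel]; split_ifs <;> first | omega | simp_all

lemma c0_of_level {n kw : String} (h : matchLevel n kw = 0) : (normWard kw == n) = true := by
  simp only [matchLevel] at h; split_ifs at h <;> simp_all

lemma c1_of_level {n kw : String} (h : matchLevel n kw = 1) :
    (nospaceT (normWard kw) == nospaceT n) = true := by
  simp only [matchLevel] at h; split_ifs at h <;> simp_all

lemma c2_of_level {n kw : String} (h : matchLevel n kw = 2) :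
    (andhyphT (normWard kw) == andhyphT n) = true := by
  simp only [matchLevel] at h; split_ifs at h <;> simp_all

lemma c3_of_level {n kw : String} (h : matchLevel n kw = 3) :
    5 ≤ PySem.Str.len n ∧ (PySem.Str.isIn n (normWard kw) || PySem.Str.isIn (normWard kw) n) = true := by
  simp only [matchLevel] at h; split_ifs at h <;> simp_all

-- ===== VERDICT (by name: the statement is the Claim_ definition above) =====
theorem match_ward_name_spec : Claim_equal_match_ward_name := by
  intro w ks _
  unfold Spec_match_ward_name
  simp only [match_ward_name, match_ward_name_alt]
  rw [fold_capped_gen (matchLevel (normWard w))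
      (matchLevelCapped (normWard w) (nospaceT (normWard w)) (andhyphT (normWard w))
        (decide (5 ≤ PySem.Str.len (normWard w))))
      (fun kw cap h => matchLevelCapped_eq (normWard w) kw cap h)
      (matchLevel_le (normWard w)) ks 4 none (by omega),
     fold_best_spec (matchLevel (normWard w)) ks 4 none]
  generalize hn : normWard w = n
  obtain ⟨m, hm⟩ : ∃ m, (ks.map (matchLevel n)).foldr min 4 = m := ⟨_, rfl⟩
  rw [hm]
  have hge : ∀ y ∈ ks, m ≤ matchLevel n y := fun y hy =>
    hm ▸ foldr_min_le_mem _ _ (List.mem_map_of_mem hy)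
  by_cases hlt : m < 4
  · -- some pass matches; minimal level is m
    obtain ⟨x0, hx0mem, hx0⟩ := List.mem_map.mp (hm ▸ foldr_min_mem (ks.map (matchLevel n)) 4 (hm ▸ hlt))
    interval_cases m
    · -- m = 0 : first scan finds it
      have : ks.find? (fun kw => normWard kw == n) = ks.find? (fun kw => matchLevel n kw == 0) := by
        apply find?_congr_mem
        intro y hy
        by_cases hc : (normWard y == n) = true
        · rw [hc]; simp [level_c0 hc]
        · simp only [Bool.not_eq_true] at hc
          rw [hc]
          have : matchLevel n y ≠ 0 := fun he => by simp [c0_of_level he] at hc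
          simp [this]
      rw [this]
      obtain ⟨x, hx⟩ : ∃ x, ks.find? (fun kw => matchLevel n kw == 0) = some x := by
        have : (ks.find? (fun kw => matchLevel n kw == 0)).isSome := by
          rw [List.find?_isSome]
          exact ⟨x0, hx0mem, by simp [hx0]⟩
        exact Option.isSome_iff_exists.mp this
      rw [hx]; simp
    · -- m = 1
      have h0 : ks.find? (fun kw => normWard kw == n) = none := by
        rw [List.find?_eq_none]
        intro y hy hc
        have := level_c0 (n := n) hc
        have := hge y hy
        omega
      rw [h0]
      have h1 : ks.find? (fun kw =>
          PySem.Str.replace (PySem.Str.replace (normWard kw) " with " "with") "coal clough" "coalclough"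
            == PySem.Str.replace (PySem.Str.replace n " with " "with") "coal clough" "coalclough")
          = ks.find? (fun kw => matchLevel n kw == 1) := by
        apply find?_congr_mem
        intro y hy
        show (nospaceT (normWard y) == nospaceT n) = (matchLevel n y == 1)
        by_cases hc : (nospaceT (normWard y) == nospaceT n) = true
        · rw [hc]
          have := level_c1 (n := n) hc
          have := hge y hy
          have : matchLevel n y = 1 := by omega
          simp [this]
        · simp only [Bool.not_eq_true] at hc
          rw [hc]
          have : matchLevel n y ≠ 1 := fun he => by simp [c1_of_level he] at hc
          simp [this]
      rw [h1]
      obtain ⟨x, hx⟩ : ∃ x, ks.find? (fun kw => matchLevel n kw == 1) = some x := by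
        have : (ks.find? (fun kw => matchLevel n kw == 1)).isSome := by
          rw [List.find?_isSome]
          exact ⟨x0, hx0mem, by simp [hx0]⟩
        exact Option.isSome_iff_exists.mp this
      rw [hx]; simp
    · -- m = 2
      have h0 : ks.find? (fun kw => normWard kw == n) = none := by
        rw [List.find?_eq_none]
        intro y hy hc
        have := level_c0 (n := n) hc; have := hge y hy; omega
      have h1 : ks.find? (fun kw =>
          PySem.Str.replace (PySem.Str.replace (normWard kw) " with " "with") "coal clough" "coalclough"
            == PySem.Str.replace (PySem.Str.replace n " with " "with") "coal clough" "coalclough")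
          = none := by
        rw [List.find?_eq_none]
        intro y hy hc
        have := level_c1 (n := n) (kw := y) hc; have := hge y hy; omega
      rw [h0, h1]
      have h2 : ks.find? (fun kw =>
          PySem.Str.replace (PySem.Str.replace (normWard kw) " and " "-") "-with-" " with "
            == PySem.Str.replace (PySem.Str.replace n " and " "-") "-with-" " with ")
          = ks.find? (fun kw => matchLevel n kw == 2) := by
        apply find?_congr_mem
        intro y hy
        show (andhyphT (normWard y) == andhyphT n) = (matchLevel n y == 2)
        by_cases hc : (andhyphT (normWard y) == andhyphT n) = true
        · rw [hc]
          have := level_c2 (n := n) hc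
          have := hge y hy
          have : matchLevel n y = 2 := by omega
          simp [this]
        · simp only [Bool.not_eq_true] at hc
          rw [hc]
          have : matchLevel n y ≠ 2 := fun he => by simp [c2_of_level he] at hc
          simp [this]
      rw [h2]
      obtain ⟨x, hx⟩ : ∃ x, ks.find? (fun kw => matchLevel n kw == 2) = some x := by
        have : (ks.find? (fun kw => matchLevel n kw == 2)).isSome := by
          rw [List.find?_isSome]
          exact ⟨x0, hx0mem, by simp [hx0]⟩
        exact Option.isSome_iff_exists.mp this
      rw [hx]; simp
    · -- m = 3
      have h0 : ks.find? (fun kw => normWard kw == n) = none := by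
        rw [List.find?_eq_none]
        intro y hy hc
        have := level_c0 (n := n) hc; have := hge y hy; omega
      have h1 : ks.find? (fun kw =>
          PySem.Str.replace (PySem.Str.replace (normWard kw) " with " "with") "coal clough" "coalclough"
            == PySem.Str.replace (PySem.Str.replace n " with " "with") "coal clough" "coalclough")
          = none := by
        rw [List.find?_eq_none]
        intro y hy hc
        have := level_c1 (n := n) (kw := y) hc; have := hge y hy; omega
      have h2 : ks.find? (fun kw =>
          PySem.Str.replace (PySem.Str.replace (normWard kw) " and " "-") "-with-" " with "
            == PySem.Str.replace (PySem.Str.replace n " and " "-") "-with-" " with ")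
          = none := by
        rw [List.find?_eq_none]
        intro y hy hc
        have := level_c2 (n := n) (kw := y) hc; have := hge y hy; omega
      rw [h0, h1, h2]
      have hlen : 5 ≤ PySem.Str.len n := (c3_of_level hx0).1
      rw [if_pos hlen]
      have h3 : ks.find? (fun kw => PySem.Str.isIn n (normWard kw) || PySem.Str.isIn (normWard kw) n)
          = ks.find? (fun kw => matchLevel n kw == 3) := by
        apply find?_congr_mem
        intro y hy
        by_cases hc : (PySem.Str.isIn n (normWard y) || PySem.Str.isIn (normWard y) n) = true
        · rw [hc]
          have := level_c3 (n := n) hlen hc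
          have := hge y hy
          have : matchLevel n y = 3 := by omega
          simp [this]
        · simp only [Bool.not_eq_true] at hc
          rw [hc]
          have : matchLevel n y ≠ 3 := fun he => by have hx3 := (c3_of_level he).2; rw [hc] at hx3; cases hx3
          simp [this]
      rw [h3]
      obtain ⟨x, hx⟩ : ∃ x, ks.find? (fun kw => matchLevel n kw == 3) = some x := by
        have : (ks.find? (fun kw => matchLevel n kw == 3)).isSome := by
          rw [List.find?_isSome]
          exact ⟨x0, hx0mem, by simp [hx0]⟩
        exact Option.isSome_iff_exists.mp this
      rw [hx]; simp
  · -- no pass matches: everything is none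
    have h4 : ∀ y ∈ ks, matchLevel n y = 4 := by
      intro y hy
      have h1 := hge y hy
      have : matchLevel n y ≤ 4 := by
        simp only [matchLevel]; split_ifs <;> omega
      omega
    have h0 : ks.find? (fun kw => normWard kw == n) = none := by
      rw [List.find?_eq_none]
      intro y hy hc
      have := level_c0 (n := n) hc; have := h4 y hy; omega
    have h1 : ks.find? (fun kw =>
        PySem.Str.replace (PySem.Str.replace (normWard kw) " with " "with") "coal clough" "coalclough"
          == PySem.Str.replace (PySem.Str.replace n " with " "with") "coal clough" "coalclough")
        = none := by
      rw [List.find?_eq_none]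
      intro y hy hc
      have := level_c1 (n := n) (kw := y) hc; have := h4 y hy; omega
    have h2 : ks.find? (fun kw =>
        PySem.Str.replace (PySem.Str.replace (normWard kw) " and " "-") "-with-" " with "
          == PySem.Str.replace (PySem.Str.replace n " and " "-") "-with-" " with ")
        = none := by
      rw [List.find?_eq_none]
      intro y hy hc
      have := level_c2 (n := n) (kw := y) hc; have := h4 y hy; omega
    rw [h0, h1, h2, if_neg hlt]
    by_cases hlen : 5 ≤ PySem.Str.len n
    · rw [if_pos hlen]
      have : ks.find? (fun kw => PySem.Str.isIn n (normWard kw) || PySem.Str.isIn (normWard kw) n) = none := by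
        rw [List.find?_eq_none]
        intro y hy hc
        have := level_c3 (n := n) hlen hc; have := h4 y hy; omega
      rw [this]
    · rw [if_neg hlen]
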